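-- pv_equiv track=rewrite | github.com/kangbw0420/QUVI | utils/common/extract_data_info.py | split_column_expressions
-- ===== SOURCE A (Python) =====
-- from typing import List, Dict, Any
--
-- def split_column_expressions(select_text: str) -> List[str]:
--     """SELECT 절의 컬럼 표현식을 올바르게 분리합니다.
--     중첩된 함수와 괄호를 고려합니다.
--     Returns:
--         List[str]: 분리된 컬럼 표현식 리스트
--     """
--     expressions = []
--     current_expr = ""
--     paren_count = 0
--     quote_char = None
--
--     for char in select_text:
--         # 따옴표 처리 (문자열 내부에서는 괄호와 쉼표를 무시)
--         if char in "\"'`" and (quote_char is None or char == quote_char):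
--             if quote_char is None:
--                 quote_char = char
--             else:
--                 quote_char = None
--
--         # 괄호 카운팅
--         if quote_char is None:
--             if char == '(':
--                 paren_count += 1
--             elif char == ')':
--                 paren_count -= 1
--
--         # 컬럼 분리 (최상위 레벨에서의 쉼표)
--         if char == ',' and paren_count == 0 and quote_char is None:
--             expressions.append(current_expr.strip())
--             current_expr = ""
--         else:
--             current_expr += char
--
--     # 마지막 표현식 추가
--     if current_expr:
--         expressions.append(current_expr.strip())
--
--     return expressions
-- ===== SOURCE B (Python) =====
-- def _next_segment(text, start):
--     """Scan text from `start`; return (raw segment up to the next top-level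
--     comma, index after that comma), or (raw tail, None) if no such comma."""
--     seg = []
--     paren = 0
--     quote = None
--     for k in range(start, len(text)):
--         c = text[k]
--         if c in "\"'`" and (quote is None or c == quote):
--             quote = c if quote is None else None
--         if quote is None:
--             if c == '(':
--                 paren += 1
--             elif c == ')':
--                 paren -= 1
--         if c == ',' and paren == 0 and quote is None:
--             return ''.join(seg), k + 1
--         seg.append(c)
--     return ''.join(seg), None
--
--
-- def split_column_expressions(select_text):
--     raw = []
--     start = 0
--     while True:
--         seg, nxt = _next_segment(select_text, start)
--         raw.append(seg)
--         if nxt is None: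
--             break
--         start = nxt
--     out = [s.strip() for s in raw[:-1]]
--     if raw[-1]:
--         out.append(raw[-1].strip())
--     return out
-- ===== Notes on version B (the rewrite author's own statement) =====
-- stated objective: alternative
-- what changed: B splits the text segment-by-segment with a helper that returns one raw segment and the resume index (resetting paren/quote state per segment, which is sound because it is (0, None) at every top-level comma), then strips the segments in a separate pass, instead of A's single loop threading an accumulator string and the output list together.
import Mathlib
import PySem

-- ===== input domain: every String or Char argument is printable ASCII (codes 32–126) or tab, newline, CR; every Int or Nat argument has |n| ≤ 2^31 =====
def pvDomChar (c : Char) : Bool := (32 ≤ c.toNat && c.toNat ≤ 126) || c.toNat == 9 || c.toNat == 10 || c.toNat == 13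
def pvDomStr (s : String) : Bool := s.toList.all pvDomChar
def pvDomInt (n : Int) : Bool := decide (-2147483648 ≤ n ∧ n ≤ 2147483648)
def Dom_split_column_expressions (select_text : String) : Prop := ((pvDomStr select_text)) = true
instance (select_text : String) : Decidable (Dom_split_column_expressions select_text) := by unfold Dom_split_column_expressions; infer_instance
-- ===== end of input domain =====

-- B splits the text segment-by-segment with a helper returning one raw segment plus the
-- resume point, then strips in a separate pass, instead of A's single loop threading the
-- accumulator string and output list together (objective: alternative, same cost).

-- shared per-character state machine (identical lines in both Pythons)
def pvQuoteStep (c : Char) (q : Option Char) : Option Char :=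
  if (c = '"' ∨ c = '\'' ∨ c = '`') ∧ (q = none ∨ q = some c) then
    (if q = none then some c else none)
  else q

def pvParenStep (c : Char) (q : Option Char) (p : Int) : Int :=
  if q = none then (if c = '(' then p + 1 else if c = ')' then p - 1 else p) else p

-- ===== PORT A =====
def pvAStep (st : List (List Char) × List Char × Int × Option Char) (c : Char) :
    List (List Char) × List Char × Int × Option Char :=
  let (exprs, cur, paren, quote) := st
  let quote := pvQuoteStep c quote
  let paren := pvParenStep c quote paren
  if c = ',' ∧ paren = 0 ∧ quote = none then
    (exprs ++ [PySem.Chars.strip cur], ([] : List Char), paren, quote)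
  else
    (exprs, cur ++ [c], paren, quote)

def split_column_expressions (select_text : String) : List String :=
  let st := select_text.toList.foldl pvAStep ([], [], 0, none)
  let exprs := if st.2.1 ≠ [] then st.1 ++ [PySem.Chars.strip st.2.1] else st.1
  exprs.map String.ofList

-- ===== PORT B =====
-- _next_segment: the raw segment up to the next top-level comma, plus the rest after
-- the comma (none if no comma).  The Python indexes into the string from `start`;
-- here the suffix is passed as a list, which is exact.
def pvNextSeg (cs : List Char) (paren : Int) (quote : Option Char) :
    List Char × Option (List Char) :=
  match cs with
  | [] => ([], none)
  | c :: rest =>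
    let quote := pvQuoteStep c quote
    let paren := pvParenStep c quote paren
    if c = ',' ∧ paren = 0 ∧ quote = none then ([], some rest)
    else
      let (seg, r) := pvNextSeg rest paren quote
      (c :: seg, r)

theorem pvNextSeg_rest_lt : ∀ (cs : List Char) (p : Int) (q : Option Char)
    (seg rest : List Char), pvNextSeg cs p q = (seg, some rest) → rest.length < cs.length := by
  intro cs
  induction cs with
  | nil => intro p q seg rest h; simp [pvNextSeg] at h
  | cons c cs ih =>
    intro p q seg rest h
    simp only [pvNextSeg] at h
    split at h
    · cases h; simp
    · rw [Prod.ext_iff] at h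
      obtain ⟨h1, h2⟩ := h
      simp only at h1 h2
      have heq : pvNextSeg cs (pvParenStep c (pvQuoteStep c q) p) (pvQuoteStep c q) =
          ((pvNextSeg cs (pvParenStep c (pvQuoteStep c q) p) (pvQuoteStep c q)).1, some rest) := by
        rw [← h2]
      have := ih _ _ _ _ heq
      simp; omega

def pvRawSegs (cs : List Char) : List (List Char) :=
  match h : pvNextSeg cs 0 none with
  | (_seg, none) => [_seg]
  | (_seg, some rest) => _seg :: pvRawSegs rest
termination_by cs.length
decreasing_by exact pvNextSeg_rest_lt cs 0 none _seg rest h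

def split_column_expressions_alt (select_text : String) : List String :=
  let raw := pvRawSegs select_text.toList
  let out := raw.dropLast.map PySem.Chars.strip
  let out := if raw.getLastD [] ≠ [] then out ++ [PySem.Chars.strip (raw.getLastD [])] else out
  out.map String.ofList

-- ===== PRECONDITION & SPEC =====
def Spec_split_column_expressions (select_text : String) (out : List String) : Prop := out = split_column_expressions_alt select_text
instance (select_text : String) (out : List String) : Decidable (Spec_split_column_expressions select_text out) := by unfold Spec_split_column_expressions; infer_instance

-- ===== CLAIM (what is proved, stated in full; the proofs are below) =====
def Claim_equal_split_column_expressions : Prop := ∀ (select_text : String), Dom_split_column_expressions select_text → Spec_split_column_expressions select_text (split_column_expressions select_text)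

-- ===== LEMMAS AND PROOFS =====
def pvFinish (st : List (List Char) × List Char × Int × Option Char) : List (List Char) :=
  if st.2.1 ≠ [] then st.1 ++ [PySem.Chars.strip st.2.1] else st.1

def pvBOut (raw : List (List Char)) : List (List Char) :=
  let out := raw.dropLast.map PySem.Chars.strip
  if raw.getLastD [] ≠ [] then out ++ [PySem.Chars.strip (raw.getLastD [])] else out

theorem pvScanNone : ∀ (cs : List Char) (p : Int) (q : Option Char)
    (exprs : List (List Char)) (cur : List Char),
    (pvNextSeg cs p q).2 = none →
    pvFinish (cs.foldl pvAStep (exprs, cur, p, q)) =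
      pvFinish (exprs, cur ++ (pvNextSeg cs p q).1, 0, none) := by
  intro cs
  induction cs with
  | nil => intro p q exprs cur h; simp [pvNextSeg, pvFinish]
  | cons c cs ih =>
    intro p q exprs cur h
    simp only [pvNextSeg, List.foldl_cons, pvAStep] at *
    by_cases hc : (c = ',' ∧ pvParenStep c (pvQuoteStep c q) p = 0 ∧ pvQuoteStep c q = none)
    · simp only [if_pos hc] at h
      exact absurd h (by simp)
    · simp only [if_neg hc] at *
      cases hps : pvNextSeg cs (pvParenStep c (pvQuoteStep c q) p) (pvQuoteStep c q) with
      | mk seg r =>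
        simp only [hps] at h ⊢
        have := ih (pvParenStep c (pvQuoteStep c q) p) (pvQuoteStep c q) exprs (cur ++ [c])
          (by rw [hps]; exact h)
        rw [hps] at this
        simpa [List.append_assoc] using this

theorem pvScanSome : ∀ (cs : List Char) (p : Int) (q : Option Char)
    (exprs : List (List Char)) (cur rest : List Char),
    (pvNextSeg cs p q).2 = some rest →
    cs.foldl pvAStep (exprs, cur, p, q) =
      rest.foldl pvAStep (exprs ++ [PySem.Chars.strip (cur ++ (pvNextSeg cs p q).1)], [], 0, none) := by
  intro cs
  induction cs with
  | nil => intro p q exprs cur rest h; simp [pvNextSeg] at h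
  | cons c cs ih =>
    intro p q exprs cur rest h
    simp only [pvNextSeg, List.foldl_cons, pvAStep] at *
    by_cases hc : (c = ',' ∧ pvParenStep c (pvQuoteStep c q) p = 0 ∧ pvQuoteStep c q = none)
    · simp only [if_pos hc] at h ⊢
      cases h
      obtain ⟨-, hp, hq⟩ := hc
      simp [hq]
      rw [← hq, hp]
    · simp only [if_neg hc] at *
      cases hps : pvNextSeg cs (pvParenStep c (pvQuoteStep c q) p) (pvQuoteStep c q) with
      | mk seg r =>
        simp only [hps] at h ⊢
        have := ih (pvParenStep c (pvQuoteStep c q) p) (pvQuoteStep c q) exprs (cur ++ [c]) rest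
          (by rw [hps]; exact h)
        rw [hps] at this
        simpa [List.append_assoc] using this

theorem pvRawSegs_ne_nil (cs : List Char) : pvRawSegs cs ≠ [] := by
  unfold pvRawSegs
  split <;> simp

theorem pvKey : ∀ (cs : List Char) (exprs : List (List Char)),
    pvFinish (cs.foldl pvAStep (exprs, [], 0, none)) = exprs ++ pvBOut (pvRawSegs cs) := by
  intro cs
  induction cs using pvRawSegs.induct with
  | case1 cs seg h =>
    intro exprs
    rw [pvRawSegs, h]
    have := pvScanNone cs 0 none exprs [] (by rw [h])
    rw [h] at this
    simp only [List.nil_append] at this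
    rw [this]
    simp only [pvFinish, pvBOut, List.dropLast, List.getLastD]
    by_cases hs : seg = [] <;> simp [hs]
  | case2 cs seg rest h ih =>
    intro exprs
    rw [pvRawSegs, h]
    have hsc := pvScanSome cs 0 none exprs [] rest (by rw [h])
    rw [h] at hsc
    simp only [List.nil_append] at hsc
    rw [hsc, ih]
    have hb : pvBOut (seg :: pvRawSegs rest) = PySem.Chars.strip seg :: pvBOut (pvRawSegs rest) := by
      have hne := pvRawSegs_ne_nil rest
      cases hr : pvRawSegs rest with
      | nil => exact absurd hr hne
      | cons a as => simp only [pvBOut, List.dropLast, List.map_cons, List.getLastD_cons]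
                     split <;> simp
    rw [hb]
    simp

-- ===== VERDICT (by name: the statement is the Claim_ definition above) =====
theorem split_column_expressions_spec : Claim_equal_split_column_expressions := by
  intro s _
  unfold Spec_split_column_expressions split_column_expressions split_column_expressions_alt
  have h := pvKey s.toList []
  simp only [pvFinish, pvBOut, List.nil_append] at h
  exact congrArg (List.map String.ofList) h
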